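-- pv_equiv track=rewrite | github.com/ShubhamShinde148/Cyber-toolkit | services/metadata_extractor.py | _build_security_flags
-- ===== SOURCE A (Python) =====
-- def _build_security_flags(metadata, gps_data):
--     flags = []
--     lowered = {str(k).lower(): str(v).lower() for k, v in metadata.items()}
--
--     if gps_data:
--         flags.append("gps_location_exposed")
--     if any("author" in k or "creator" in k for k in lowered):
--         flags.append("author_identity_exposed")
--     if any("software" in k or "producer" in k for k in lowered):
--         flags.append("software_fingerprint_exposed")
--     if any("date" in k or "time" in k or "created" in k or "modified" in k for k in lowered):
--         flags.append("timeline_metadata_exposed")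
--     if any("last_modified_by" in k for k in lowered):
--         flags.append("editor_identity_exposed")
--
--     # Keep stable order and unique values.
--     unique_flags = []
--     for flag in flags:
--         if flag not in unique_flags:
--             unique_flags.append(flag)
--     return unique_flags
-- ===== SOURCE B (Python) =====
-- def _build_security_flags(metadata, gps_data):
--     # Single pass over the keys accumulating one boolean per category,
--     # then emit the flags in the fixed canonical order (no dedup pass needed).
--     author = software = timeline = editor = False
--     for k in metadata:
--         k = str(k).lower()
--         author = author or "author" in k or "creator" in k
--         software = software or "software" in k or "producer" in k
--         timeline = timeline or "date" in k or "time" in k or "created" in k or "modified" in k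
--         editor = editor or "last_modified_by" in k
--     flags = []
--     if gps_data:
--         flags.append("gps_location_exposed")
--     if author:
--         flags.append("author_identity_exposed")
--     if software:
--         flags.append("software_fingerprint_exposed")
--     if timeline:
--         flags.append("timeline_metadata_exposed")
--     if editor:
--         flags.append("editor_identity_exposed")
--     return flags
-- ===== Notes on version B (the rewrite author's own statement) =====
-- stated objective: simpler
-- what changed: Replaces the lowered-dict build, five separate any() scans over its keys and the final dedup loop by one pass over the keys that ORs four category booleans, then emits the flags once in canonical order.
import Mathlib
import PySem

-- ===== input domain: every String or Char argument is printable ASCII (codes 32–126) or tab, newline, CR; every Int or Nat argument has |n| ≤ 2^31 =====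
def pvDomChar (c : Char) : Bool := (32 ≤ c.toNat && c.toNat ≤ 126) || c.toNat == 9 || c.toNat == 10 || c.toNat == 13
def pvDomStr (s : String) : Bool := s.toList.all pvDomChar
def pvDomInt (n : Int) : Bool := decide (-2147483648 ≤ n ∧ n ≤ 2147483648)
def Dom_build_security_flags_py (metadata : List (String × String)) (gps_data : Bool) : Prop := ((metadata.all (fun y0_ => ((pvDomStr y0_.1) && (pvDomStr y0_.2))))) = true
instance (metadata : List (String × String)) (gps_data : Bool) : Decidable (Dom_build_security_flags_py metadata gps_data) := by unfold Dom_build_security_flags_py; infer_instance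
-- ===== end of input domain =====

-- B replaces the dict build + five any() scans + dedup loop by one accumulating pass
-- over the keys and an ordered emission of the flags (simpler; return value only).

-- ===== PORT A =====
def build_security_flags_py (metadata : List (String × String)) (gps_data : Bool) : List String :=
  let lowered : PySem.Dict String String :=
    metadata.foldl (fun d kv => d.insert (PySem.Str.lower kv.1) (PySem.Str.lower kv.2)) PySem.Dict.empty
  let flags := (if gps_data then ["gps_location_exposed"] else [])
  let flags := if lowered.keys.any (fun k => PySem.Str.isIn "author" k || PySem.Str.isIn "creator" k)
    then flags ++ ["author_identity_exposed"] else flags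
  let flags := if lowered.keys.any (fun k => PySem.Str.isIn "software" k || PySem.Str.isIn "producer" k)
    then flags ++ ["software_fingerprint_exposed"] else flags
  let flags := if lowered.keys.any (fun k => PySem.Str.isIn "date" k || PySem.Str.isIn "time" k ||
      PySem.Str.isIn "created" k || PySem.Str.isIn "modified" k)
    then flags ++ ["timeline_metadata_exposed"] else flags
  let flags := if lowered.keys.any (fun k => PySem.Str.isIn "last_modified_by" k)
    then flags ++ ["editor_identity_exposed"] else flags
  flags.foldl (fun acc f => if f ∈ acc then acc else acc ++ [f]) []

-- ===== PORT B =====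
def build_security_flags_py_alt (metadata : List (String × String)) (gps_data : Bool) : List String :=
  let st := metadata.foldl (fun st kv =>
    let k := PySem.Str.lower kv.1
    (st.1 || PySem.Str.isIn "author" k || PySem.Str.isIn "creator" k,
     st.2.1 || PySem.Str.isIn "software" k || PySem.Str.isIn "producer" k,
     st.2.2.1 || PySem.Str.isIn "date" k || PySem.Str.isIn "time" k ||
       PySem.Str.isIn "created" k || PySem.Str.isIn "modified" k,
     st.2.2.2 || PySem.Str.isIn "last_modified_by" k)) (false, false, false, false)
  (if gps_data then ["gps_location_exposed"] else []) ++
  (if st.1 then ["author_identity_exposed"] else []) ++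
  (if st.2.1 then ["software_fingerprint_exposed"] else []) ++
  (if st.2.2.1 then ["timeline_metadata_exposed"] else []) ++
  (if st.2.2.2 then ["editor_identity_exposed"] else [])

-- ===== PRECONDITION & SPEC =====
def Spec_build_security_flags_py (metadata : List (String × String)) (gps_data : Bool) (out : List String) : Prop := out = build_security_flags_py_alt metadata gps_data
instance (metadata : List (String × String)) (gps_data : Bool) (out : List String) : Decidable (Spec_build_security_flags_py metadata gps_data out) := by unfold Spec_build_security_flags_py; infer_instance

-- ===== CLAIM (what is proved, stated in full; the proofs are below) =====
def Claim_equal_build_security_flags_py : Prop := ∀ (metadata : List (String × String)) (gps_data : Bool), Dom_build_security_flags_py metadata gps_data → Spec_build_security_flags_py metadata gps_data (build_security_flags_py metadata gps_data)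

-- ===== LEMMAS AND PROOFS =====

-- an `any` over the keys of a dict after one insert picks up the inserted key
theorem pv_any_keys_insert {d : PySem.Dict String String} (k v : String) (p : String → Bool) :
    ((d.insert k v).keys.any p) = (p k || d.keys.any p) := by
  rw [Bool.eq_iff_iff]
  simp only [List.any_eq_true, Bool.or_eq_true, PySem.Dict.mem_keys_insert]
  constructor
  · rintro ⟨x, hx | hx, hp⟩
    · exact Or.inl (hx ▸ hp)
    · exact Or.inr ⟨x, hx, hp⟩
  · rintro (hp | ⟨x, hx, hp⟩)
    · exact ⟨k, Or.inl rfl, hp⟩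
    · exact ⟨x, Or.inr hx, hp⟩

-- an `any` over the keys of the lowered dict is an `any` over the lowered original keys
theorem pv_any_keys_fold (l : List (String × String)) (d : PySem.Dict String String) (p : String → Bool) :
    ((l.foldl (fun d kv => d.insert (PySem.Str.lower kv.1) (PySem.Str.lower kv.2)) d).keys.any p)
      = (d.keys.any p || l.any (fun kv => p (PySem.Str.lower kv.1))) := by
  induction l generalizing d with
  | nil => simp
  | cons kv t ih =>
    simp only [List.foldl_cons, List.any_cons, ih, pv_any_keys_insert]
    cases p (PySem.Str.lower kv.1) <;> simp

-- B's fold computes the four `any`s componentwise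
theorem pv_fold_state (l : List (String × String)) (st : Bool × Bool × Bool × Bool) :
    l.foldl (fun st kv =>
      let k := PySem.Str.lower kv.1
      (st.1 || PySem.Str.isIn "author" k || PySem.Str.isIn "creator" k,
       st.2.1 || PySem.Str.isIn "software" k || PySem.Str.isIn "producer" k,
       st.2.2.1 || PySem.Str.isIn "date" k || PySem.Str.isIn "time" k ||
         PySem.Str.isIn "created" k || PySem.Str.isIn "modified" k,
       st.2.2.2 || PySem.Str.isIn "last_modified_by" k)) st
    = (st.1 || l.any (fun kv => PySem.Str.isIn "author" (PySem.Str.lower kv.1) || PySem.Str.isIn "creator" (PySem.Str.lower kv.1)),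
       st.2.1 || l.any (fun kv => PySem.Str.isIn "software" (PySem.Str.lower kv.1) || PySem.Str.isIn "producer" (PySem.Str.lower kv.1)),
       st.2.2.1 || l.any (fun kv => PySem.Str.isIn "date" (PySem.Str.lower kv.1) || PySem.Str.isIn "time" (PySem.Str.lower kv.1) ||
         PySem.Str.isIn "created" (PySem.Str.lower kv.1) || PySem.Str.isIn "modified" (PySem.Str.lower kv.1)),
       st.2.2.2 || l.any (fun kv => PySem.Str.isIn "last_modified_by" (PySem.Str.lower kv.1))) := by
  induction l generalizing st with
  | nil => simp
  | cons kv t ih =>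
    rw [List.foldl_cons, ih]
    simp [Bool.or_assoc]

-- ===== VERDICT (by name: the statement is the Claim_ definition above) =====
theorem build_security_flags_py_spec : Claim_equal_build_security_flags_py := by
  intro metadata gps_data _
  unfold Spec_build_security_flags_py build_security_flags_py build_security_flags_py_alt
  simp only [pv_any_keys_fold, pv_fold_state, PySem.Dict.keys_empty, List.any_nil, Bool.false_or]
  cases gps_data <;>
    cases h1 : metadata.any (fun kv => PySem.Str.isIn "author" (PySem.Str.lower kv.1) || PySem.Str.isIn "creator" (PySem.Str.lower kv.1)) <;>
    cases h2 : metadata.any (fun kv => PySem.Str.isIn "software" (PySem.Str.lower kv.1) || PySem.Str.isIn "producer" (PySem.Str.lower kv.1)) <;>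
    cases h3 : metadata.any (fun kv => PySem.Str.isIn "date" (PySem.Str.lower kv.1) || PySem.Str.isIn "time" (PySem.Str.lower kv.1) ||
      PySem.Str.isIn "created" (PySem.Str.lower kv.1) || PySem.Str.isIn "modified" (PySem.Str.lower kv.1)) <;>
    cases h4 : metadata.any (fun kv => PySem.Str.isIn "last_modified_by" (PySem.Str.lower kv.1)) <;>
    simp
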